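-- pv_equiv track=rewrite | github.com/getachew67/CSE-160 | Midterm 1/midterm_21au.py | check_same_parity
-- ===== SOURCE A (Python) =====
-- def check_same_parity(nums_lst):
--     '''
--     Takes in a list of lists of integers and returns True if every number
--     in each sublist has the same parity. Otherwise, the function should
--     return False. Assume that nums_lst is not empty and each sublist
--     contains at least one integer.
--
--     Arguments:
--         nums_lst: a list of lists of integers.
--
--     Returns: a boolean value indicating if all numbers in each sublist
--     shares the same parity
--     '''
--     def is_row_even(row):
--         remainders = sum(i % 2 for i in row)
--         if remainders != 0:
--             return False
--         return True
--
--     def is_row_odd(row):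
--         remainders = sum(i % 2 for i in row)
--         if remainders != len(row):
--             return False
--         return True
--
--     for row in nums_lst:
--         if not is_row_even(row) and not is_row_odd(row):
--             return False
--     return True
-- ===== SOURCE B (Python) =====
-- def check_same_parity(nums_lst):
--     return all(all(x % 2 == row[0] % 2 for x in row) for row in nums_lst)
-- ===== Notes on version B (the rewrite author's own statement) =====
-- stated objective: simpler
-- what changed: Replaces the two count-based helpers (summing remainders and comparing against 0 and len) plus an explicit early-return loop with a single reference-parity comparison: each element's parity is compared to the row's first element, combined with nested all().
import Mathlib
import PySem

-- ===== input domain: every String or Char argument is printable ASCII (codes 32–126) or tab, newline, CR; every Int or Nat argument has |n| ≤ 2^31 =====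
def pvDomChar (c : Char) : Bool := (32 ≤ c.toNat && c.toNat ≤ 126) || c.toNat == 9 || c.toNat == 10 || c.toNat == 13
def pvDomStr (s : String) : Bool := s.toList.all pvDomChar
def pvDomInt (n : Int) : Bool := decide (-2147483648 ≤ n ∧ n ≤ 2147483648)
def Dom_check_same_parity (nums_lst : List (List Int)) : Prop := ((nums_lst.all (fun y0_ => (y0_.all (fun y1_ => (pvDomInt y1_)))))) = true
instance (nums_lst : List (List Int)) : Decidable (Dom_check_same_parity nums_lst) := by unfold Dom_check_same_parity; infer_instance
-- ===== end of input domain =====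

-- ===== PORT A =====
-- B replaces the two remainder-count helpers with a reference-parity comparison via nested all() (simpler).
def pvSumMod (row : List Int) : Int := (row.map (fun i => PySem.Int.mod i 2)).sum

def pvIsRowEven (row : List Int) : Bool :=
  if pvSumMod row ≠ 0 then false else true

def pvIsRowOdd (row : List Int) : Bool :=
  if pvSumMod row ≠ (row.length : Int) then false else true

def pvLoopA : List (List Int) → Bool
  | [] => true
  | row :: rest =>
      if ¬ pvIsRowEven row ∧ ¬ pvIsRowOdd row then false else pvLoopA rest

def check_same_parity (nums_lst : List (List Int)) : Bool := pvLoopA nums_lst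

-- ===== PORT B =====
def check_same_parity_alt (nums_lst : List (List Int)) : Bool :=
  nums_lst.all (fun row =>
    row.all (fun x => PySem.Int.mod x 2 == PySem.Int.mod (row.headD 0) 2))

-- ===== PRECONDITION & SPEC =====
def Spec_check_same_parity (nums_lst : List (List Int)) (out : Bool) : Prop := out = check_same_parity_alt nums_lst
instance (nums_lst : List (List Int)) (out : Bool) : Decidable (Spec_check_same_parity nums_lst out) := by unfold Spec_check_same_parity; infer_instance

-- ===== CLAIM (what is proved, stated in full; the proofs are below) =====
def Claim_equal_check_same_parity : Prop := ∀ (nums_lst : List (List Int)), Dom_check_same_parity nums_lst → Spec_check_same_parity nums_lst (check_same_parity nums_lst)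

-- ===== LEMMAS AND PROOFS =====

theorem pvSumMod_cons (h : Int) (t : List Int) :
    pvSumMod (h :: t) = PySem.Int.mod h 2 + pvSumMod t := by
  simp [pvSumMod]

theorem pvSumMod_bounds (row : List Int) :
    0 ≤ pvSumMod row ∧ pvSumMod row ≤ (row.length : Int) := by
  induction row with
  | nil => simp [pvSumMod]
  | cons h t ih =>
      rcases PySem.Int.mod_two_eq h with hm | hm <;>
        · rw [pvSumMod_cons, hm]; simp only [List.length_cons]; push_cast; omega

theorem pvSum_zero_iff (row : List Int) :
    pvSumMod row = 0 ↔ row.all (fun x => PySem.Int.mod x 2 == 0) := by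
  induction row with
  | nil => simp [pvSumMod]
  | cons h t ih =>
      have hb := pvSumMod_bounds t
      rw [pvSumMod_cons]
      simp only [List.all_cons, Bool.and_eq_true, beq_iff_eq, ← ih]
      rcases PySem.Int.mod_two_eq h with hm | hm <;> rw [hm] <;>
        constructor <;> intro hx <;> omega

theorem pvSum_len_iff (row : List Int) :
    pvSumMod row = (row.length : Int) ↔ row.all (fun x => PySem.Int.mod x 2 == 1) := by
  induction row with
  | nil => simp [pvSumMod]
  | cons h t ih =>
      have hb := pvSumMod_bounds t
      rw [pvSumMod_cons]
      simp only [List.all_cons, Bool.and_eq_true, beq_iff_eq, List.length_cons, ← ih]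
      push_cast
      rcases PySem.Int.mod_two_eq h with hm | hm <;> rw [hm] <;>
        constructor <;> intro hx <;> omega

theorem pvRow_eq (row : List Int) :
    (if ¬ pvIsRowEven row = true ∧ ¬ pvIsRowOdd row = true then false else true) =
      row.all (fun x => PySem.Int.mod x 2 == PySem.Int.mod (row.headD 0) 2) := by
  cases row with
  | nil => simp [pvIsRowEven, pvSumMod]
  | cons h t =>
      have hz := pvSum_zero_iff (h :: t)
      have hl := pvSum_len_iff (h :: t)
      have hlen : (0 : Int) < ((h :: t).length : Int) := by
        simp only [List.length_cons]; push_cast; omega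
      simp only [List.headD_cons]
      rcases PySem.Int.mod_two_eq h with hm | hm <;> rw [hm]
      · by_cases h0 : pvSumMod (h :: t) = 0
        · have hall : ((h :: t).all fun x => PySem.Int.mod x 2 == 0) = true := hz.mp h0
          have he : pvIsRowEven (h :: t) = true := by simp [pvIsRowEven, h0]
          rw [he, hall]; simp
        · have hall : ((h :: t).all fun x => PySem.Int.mod x 2 == 0) = false := by
            rw [Bool.eq_false_iff]; intro ha; exact h0 (hz.mpr ha)
          have hne : pvSumMod (h :: t) ≠ ((h :: t).length : Int) := by
            intro he
            have := hl.mp he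
            simp only [List.all_cons, Bool.and_eq_true, beq_iff_eq] at this
            omega
          have he : pvIsRowEven (h :: t) = false := by simp [pvIsRowEven, h0]
          have ho : pvIsRowOdd (h :: t) = false := by
            push_cast [List.length_cons] at hne; simp [pvIsRowOdd, hne]
          rw [he, ho, hall]; simp
      · by_cases h0 : pvSumMod (h :: t) = ((h :: t).length : Int)
        · have hall : ((h :: t).all fun x => PySem.Int.mod x 2 == 1) = true := hl.mp h0
          have ho : pvIsRowOdd (h :: t) = true := by simp [pvIsRowOdd, h0]
          rw [ho, hall]; simp
        · have hall : ((h :: t).all fun x => PySem.Int.mod x 2 == 1) = false := by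
            rw [Bool.eq_false_iff]; intro ha; exact h0 (hl.mpr ha)
          have hne : pvSumMod (h :: t) ≠ 0 := by
            intro he
            have := hz.mp he
            simp only [List.all_cons, Bool.and_eq_true, beq_iff_eq] at this
            omega
          have he : pvIsRowEven (h :: t) = false := by simp [pvIsRowEven, hne]
          have ho : pvIsRowOdd (h :: t) = false := by
            push_cast [List.length_cons] at h0; simp [pvIsRowOdd, h0]
          rw [he, ho, hall]; simp

theorem pvLoop_eq (l : List (List Int)) : pvLoopA l = check_same_parity_alt l := by
  induction l with
  | nil => rfl
  | cons row rest ih =>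
      simp only [pvLoopA, check_same_parity_alt, List.all_cons] at *
      rw [← pvRow_eq row]
      split_ifs with hc
      · simp
      · rw [ih]; simp

-- ===== VERDICT (by name: the statement is the Claim_ definition above) =====
theorem check_same_parity_spec : Claim_equal_check_same_parity := by
  intro nums_lst _
  unfold Spec_check_same_parity check_same_parity
  exact pvLoop_eq nums_lst
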